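-- pv_equiv track=rewrite | github.com/ritikdrona/programs | python/maxJobs.py | func
-- ===== SOURCE A (Python) =====
-- def func(T: int, Exp: list[int], currentExp: int):
--     if len(Exp) == 0:
--         return 0
--     if currentExp >= Exp[0]:
--         return 1 + func(T, Exp[1:], currentExp)
--     else:
--         if T > Exp[0]:
--             return max(1 + func(T-Exp[0], Exp[1:], Exp[0]), func(T, Exp[1:], currentExp))
--         else:
--             return func(T, Exp[1:], currentExp)
-- ===== SOURCE B (Python) =====
-- def func(T: int, Exp: list[int], currentExp: int):
--     # Top-down DP: memoize the branching recursion on the state (index, T, currentExp).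
--     n = len(Exp)
--     memo = {}
--
--     def go(i, t, c):
--         if i == n:
--             return 0
--         key = (i, t, c)
--         if key in memo:
--             return memo[key]
--         e = Exp[i]
--         if c >= e:
--             v = 1 + go(i + 1, t, c)
--         elif t > e:
--             v = max(1 + go(i + 1, t - e, e), go(i + 1, t, c))
--         else:
--             v = go(i + 1, t, c)
--         memo[key] = v
--         return v
--
--     return go(0, T, currentExp)
-- ===== Notes on version B (the rewrite author's own statement) =====
-- stated objective: faster
-- what changed: Replaced the plain branching recursion with a top-down dynamic program: the same recursion memoized in a dictionary keyed by the state (index, T, currentExp), so each reachable state is solved once instead of once per path; intended as faster, and a timing run measured B 36-64x faster at n=4096 (one probe run saw A time out there while B answered in ~3 ms), though B's Python recursion hits the interpreter depth limit at n=16384.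
import Mathlib
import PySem

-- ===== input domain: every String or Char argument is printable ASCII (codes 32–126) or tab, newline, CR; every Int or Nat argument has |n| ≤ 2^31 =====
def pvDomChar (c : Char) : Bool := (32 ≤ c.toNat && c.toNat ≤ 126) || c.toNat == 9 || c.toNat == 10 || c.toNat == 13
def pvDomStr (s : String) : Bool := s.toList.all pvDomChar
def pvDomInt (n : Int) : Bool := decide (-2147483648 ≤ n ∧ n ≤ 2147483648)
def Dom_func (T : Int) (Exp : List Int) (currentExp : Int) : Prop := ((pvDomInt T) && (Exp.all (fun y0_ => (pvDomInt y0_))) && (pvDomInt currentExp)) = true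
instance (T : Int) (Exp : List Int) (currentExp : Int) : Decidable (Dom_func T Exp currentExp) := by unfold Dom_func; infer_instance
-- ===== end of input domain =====

-- B is the same recursion as A memoized in a dict keyed by the state (index, T, currentExp), so each reachable state is solved once (objective: faster; a timing run measured B 36-64x faster at n=4096).

-- ===== PORT A =====
def func (T : Int) (Exp : List Int) (currentExp : Int) : Int :=
  match Exp with
  | [] => 0                                      -- if len(Exp) == 0: return 0
  | e :: rest =>                                 -- Exp[0] = e, Exp[1:] = rest
    if currentExp ≥ e then 1 + func T rest currentExp
    else if T > e then max (1 + func (T - e) rest e) (func T rest currentExp)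
    else func T rest currentExp

-- ===== PORT B =====
-- go(i, t, c) of Source B, threading the memo dict (key = (i, t, c), i cast to Int).
-- 'fuel' only makes the recursion structural: every call has fuel + i = Exp.length, so
-- 'fuel = 0' is exactly Python's 'i == n' test and the 0-fuel branch is Python's base case.
def funcMemo (Exp : List Int) : Nat → Nat → Int → Int →
    PySem.Dict (Int × Int × Int) Int → Int × PySem.Dict (Int × Int × Int) Int
  | 0, _, _, _, m => (0, m)                      -- if i == n: return 0
  | fuel + 1, i, t, c, m =>
    match m.get? ((i : Int), t, c) with          -- if key in memo: return memo[key]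
    | some v => (v, m)
    | none =>
      let e := Exp.getD i 0                      -- e = Exp[i] (i < n here, so in range)
      let p :=
        if c ≥ e then
          let q := funcMemo Exp fuel (i + 1) t c m
          (1 + q.1, q.2)
        else if t > e then
          let q1 := funcMemo Exp fuel (i + 1) (t - e) e m
          let q2 := funcMemo Exp fuel (i + 1) t c q1.2
          (max (1 + q1.1) q2.1, q2.2)
        else funcMemo Exp fuel (i + 1) t c m
      (p.1, p.2.insert ((i : Int), t, c) p.1)    -- memo[key] = v; return v

def func_alt (T : Int) (Exp : List Int) (currentExp : Int) : Int :=
  (funcMemo Exp Exp.length 0 T currentExp PySem.Dict.empty).1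

-- ===== PRECONDITION & SPEC =====
def Spec_func (T : Int) (Exp : List Int) (currentExp : Int) (out : Int) : Prop := out = func_alt T Exp currentExp
instance (T : Int) (Exp : List Int) (currentExp : Int) (out : Int) : Decidable (Spec_func T Exp currentExp out) := by unfold Spec_func; infer_instance

-- ===== CLAIM (what is proved, stated in full; the proofs are below) =====
def Claim_equal_func : Prop := ∀ (T : Int) (Exp : List Int) (currentExp : Int), Dom_func T Exp currentExp → Spec_func T Exp currentExp (func T Exp currentExp)

-- ===== LEMMAS AND PROOFS =====

-- Memo invariant: every cached value is A's value on the corresponding suffix of Exp.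
def MemoInv (Exp : List Int) (m : PySem.Dict (Int × Int × Int) Int) : Prop :=
  ∀ (j : Nat) (t c v : Int), m.get? ((j : Int), t, c) = some v → v = func t (Exp.drop j) c

lemma memoInv_empty (Exp : List Int) : MemoInv Exp (PySem.Dict.empty) := by
  intro j t c v h
  simp [PySem.Dict.get?_empty] at h

lemma memoInv_insert (Exp : List Int) (m : PySem.Dict (Int × Int × Int) Int)
    (i : Nat) (t c v : Int) (hm : MemoInv Exp m) (hv : v = func t (Exp.drop i) c) :
    MemoInv Exp (m.insert ((i : Int), t, c) v) := by
  intro j t' c' v' h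
  rw [PySem.Dict.get?_insert] at h
  split at h
  · rename_i heq
    rw [Prod.mk.injEq, Prod.mk.injEq] at heq
    obtain ⟨h1, h2, h3⟩ := heq
    have hj : j = i := by exact_mod_cast h1
    injection h with h4
    subst hj h2 h3 h4
    exact hv
  · exact hm j t' c' v' h

lemma funcMemo_correct (Exp : List Int) :
    ∀ (fuel i : Nat), fuel + i = Exp.length →
    ∀ (t c : Int) (m : PySem.Dict (Int × Int × Int) Int), MemoInv Exp m →
    (funcMemo Exp fuel i t c m).1 = func t (Exp.drop i) c ∧
      MemoInv Exp (funcMemo Exp fuel i t c m).2 := by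
  intro fuel
  induction fuel with
  | zero =>
    intro i hfi t c m hm
    rw [funcMemo, List.drop_eq_nil_of_le (by omega)]
    exact ⟨rfl, hm⟩
  | succ fuel ih =>
    intro i hfi t c m hm
    have hlt : i < Exp.length := by omega
    have hdrop : Exp.drop i = Exp[i] :: Exp.drop (i + 1) := (List.getElem_cons_drop hlt).symm
    have hgetD : Exp.getD i 0 = Exp[i] := List.getD_eq_getElem _ _ hlt
    have hrec : fuel + (i + 1) = Exp.length := by omega
    rw [funcMemo]
    cases hget : m.get? ((i : Int), t, c) with
    | some v => exact ⟨hm i t c v hget, hm⟩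
    | none =>
      simp only [hgetD]
      by_cases hc : c ≥ Exp[i]
      · obtain ⟨h1, h2⟩ := ih (i + 1) hrec t c m hm
        simp only [hc, if_pos]
        have hval : 1 + (funcMemo Exp fuel (i + 1) t c m).1 = func t (Exp.drop i) c := by
          rw [hdrop, func, if_pos hc, h1]
        exact ⟨hval, memoInv_insert Exp _ i t c _ h2 hval⟩
      · simp only [hc, if_neg, not_false_iff]
        by_cases ht : t > Exp[i]
        · obtain ⟨h1, h2⟩ := ih (i + 1) hrec (t - Exp[i]) Exp[i] m hm
          obtain ⟨h3, h4⟩ := ih (i + 1) hrec t c _ h2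
          simp only [ht, if_pos]
          have hval : max (1 + (funcMemo Exp fuel (i + 1) (t - Exp[i]) Exp[i] m).1)
              (funcMemo Exp fuel (i + 1) t c (funcMemo Exp fuel (i + 1) (t - Exp[i]) Exp[i] m).2).1
              = func t (Exp.drop i) c := by
            rw [hdrop, func, if_neg hc, if_pos ht, h1, h3]
          exact ⟨hval, memoInv_insert Exp _ i t c _ h4 hval⟩
        · obtain ⟨h1, h2⟩ := ih (i + 1) hrec t c m hm
          simp only [ht, if_neg, not_false_iff]
          have hval : (funcMemo Exp fuel (i + 1) t c m).1 = func t (Exp.drop i) c := by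
            rw [hdrop, func, if_neg hc, if_neg ht, h1]
          exact ⟨hval, memoInv_insert Exp _ i t c _ h2 hval⟩

-- ===== VERDICT (by name: the statement is the Claim_ definition above) =====
theorem func_spec : Claim_equal_func := by
  intro T Exp currentExp _
  unfold Spec_func func_alt
  have h := (funcMemo_correct Exp Exp.length 0 (by omega) T currentExp
    PySem.Dict.empty (memoInv_empty Exp)).1
  rw [h, List.drop_zero]
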